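-- pv_equiv track=rewrite | github.com/Dong-Uri/Algorithm | 프로그래머스/2/340211. ［PCCP 기출문제］ 3번 ／ 충돌위험 찾기/［PCCP 기출문제］ 3번 ／ 충돌위험 찾기.py | solution
-- ===== SOURCE A (Python) =====
-- def solution(points, routes):
--     def moving_route(route):
--         mr = [points[route[0] - 1]]
--         route.pop(0)
--         while route:
--             if mr[-1] == points[route[0] - 1]:
--                 route.pop(0)
--             elif mr[-1][0] > points[route[0] - 1][0]:
--                 mr.append([mr[-1][0] - 1, mr[-1][1]])
--             elif mr[-1][0] < points[route[0] - 1][0]: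
--                 mr.append([mr[-1][0] + 1, mr[-1][1]])
--             elif mr[-1][1] > points[route[0] - 1][1]:
--                 mr.append([mr[-1][0], mr[-1][1] - 1])
--             else:
--                 mr.append([mr[-1][0], mr[-1][1] + 1])
--         return mr
--     mrs = []
--     for route in routes:
--         mrs.append(moving_route(route))
--     answer = 0
--     i = 0
--     while True:
--         cnt_dict = {-1:0}
--         for mr in mrs:
--             if i < len(mr):
--                 now = (mr[i][0] - 1) * 100 + mr[i][1] - 1
--                 if now in cnt_dict.keys():
--                     if cnt_dict[now] == 1:
--                         answer += 1
--                     cnt_dict[now] += 1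
--                 else:
--                     cnt_dict[now] = 1
--                 cnt_dict[-1] += 1
--         if cnt_dict[-1] <= 1:
--             break
--         i += 1
--     return answer
-- ===== SOURCE B (Python) =====
-- def solution(points, routes):
--     # Build each robot's path leg by leg with arithmetic ranges: A's cell-by-cell walk
--     # moves x fully toward the target first, then y, so each leg is two ranges.
--     # (A empties each route list via pop; B does not mutate its arguments.)
--     def path(route):
--         x, y = points[route[0] - 1]
--         cells = [[x, y]]
--         for idx in route[1:]:
--             tx, ty = points[idx - 1]
--             sx = 1 if tx >= x else -1
--             for nx in range(x + sx, tx + sx, sx):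
--                 cells.append([nx, y])
--             sy = 1 if ty >= y else -1
--             for ny in range(y + sy, ty + sy, sy):
--                 cells.append([tx, ny])
--             x, y = tx, ty
--         return cells
--
--     counter = {}
--     for route in routes:
--         for t, cell in enumerate(path(route)):
--             key = (t, (cell[0] - 1) * 100 + cell[1] - 1)
--             counter[key] = counter.get(key, 0) + 1
--     return sum(1 for v in counter.values() if v >= 2)
-- ===== Notes on version B (the rewrite author's own statement) =====
-- stated objective: simpler
-- what changed: Replaces both of A's loops: the cell-by-cell while-walk that builds each path becomes a per-leg construction from two arithmetic ranges (x fully first, then y, which is exactly A's movement order), and the time-synchronized while-True sweep with its cnt_dict[-1] sentinel and break becomes one flat tally keyed by (time, encoded cell), returning the number of keys hit at least twice; …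
-- outside the precondition, e.g. on solution([[2, 2], [1, 0]], [[2, 2], [2, 2], [1, 1]]): A returns 0, B returns 1; on solution([[1, 2, 3]], [[1, 1]]): A returns 0, B raises ValueError
import Mathlib
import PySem

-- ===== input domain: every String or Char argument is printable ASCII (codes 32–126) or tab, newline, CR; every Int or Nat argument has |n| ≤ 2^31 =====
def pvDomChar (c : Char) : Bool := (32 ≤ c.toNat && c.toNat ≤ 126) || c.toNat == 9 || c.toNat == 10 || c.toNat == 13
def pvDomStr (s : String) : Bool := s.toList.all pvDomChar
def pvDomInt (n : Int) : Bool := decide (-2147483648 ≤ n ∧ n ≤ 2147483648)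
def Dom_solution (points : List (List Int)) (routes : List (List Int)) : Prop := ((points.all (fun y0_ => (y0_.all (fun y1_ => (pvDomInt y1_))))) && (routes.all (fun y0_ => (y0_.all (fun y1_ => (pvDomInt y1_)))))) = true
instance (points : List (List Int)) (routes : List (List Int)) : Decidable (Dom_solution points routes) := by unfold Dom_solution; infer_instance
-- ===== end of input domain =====

-- B builds each path leg by leg from two arithmetic ranges (x first, then y — A's movement
-- order) instead of A's cell-by-cell walk, and replaces A's time-synchronized sweep (with its
-- cnt_dict[-1] sentinel and break) by one flat tally keyed by (time, encoded cell).
-- Python A empties each route list in place (pop); B does not mutate its arguments: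
-- the equivalence proved here is about the return value only.

-- ===== PORT A =====

-- now-key of a cell: (cell[0] - 1) * 100 + cell[1] - 1.  The pyGetD default 0 is never used
-- under Pre_ (every path cell is a coordinate pair; Python raises IndexError otherwise).
def nowKey (cell : List Int) : Int :=
  (PySem.List.pyGetD cell 0 0 - 1) * 100 + PySem.List.pyGetD cell 1 0 - 1

-- termination measure for the while-loop of moving_route
def mrDist (points : List (List Int)) (cur : List Int) (route : List Int) : Nat :=
  match route with
  | [] => 0
  | r :: _ =>
    match PySem.List.pyGet? points (r - 1), cur with
    | some [tx, ty], [cx, cy] => (cx - tx).natAbs + (cy - ty).natAbs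
    | _, _ => 0

-- termination helper lemmas for mrGo (cited by name below)
theorem pvLexLeft (n m d1 d2 : Nat) (h : n < m) :
    Prod.Lex (· < ·) (· < ·) (n, d1) (m, d2) := Prod.Lex.left _ _ h

theorem pvLexRight (n d1 d2 : Nat) (h : d1 < d2) :
    Prod.Lex (· < ·) (· < ·) (n, d1) (n, d2) := Prod.Lex.right _ h

theorem mrDistDec1 (points : List (List Int)) (r : Int) (rest : List Int) (cx cy tx ty : Int)
    (hT : PySem.List.pyGet? points (r - 1) = some [tx, ty]) (h1 : tx < cx) :
    mrDist points [cx - 1, cy] (r :: rest) < mrDist points [cx, cy] (r :: rest) := by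
  simp only [mrDist, hT]; omega

theorem mrDistDec2 (points : List (List Int)) (r : Int) (rest : List Int) (cx cy tx ty : Int)
    (hT : PySem.List.pyGet? points (r - 1) = some [tx, ty]) (h2 : cx < tx) :
    mrDist points [cx + 1, cy] (r :: rest) < mrDist points [cx, cy] (r :: rest) := by
  simp only [mrDist, hT]; omega

theorem mrDistDec3 (points : List (List Int)) (r : Int) (rest : List Int) (cx cy tx ty : Int)
    (hT : PySem.List.pyGet? points (r - 1) = some [tx, ty]) (h3 : ty < cy) :
    mrDist points [cx, cy - 1] (r :: rest) < mrDist points [cx, cy] (r :: rest) := by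
  simp only [mrDist, hT]; omega

theorem mrDistDec4 (points : List (List Int)) (r : Int) (rest : List Int) (cx cy tx ty : Int)
    (hT : PySem.List.pyGet? points (r - 1) = some [tx, ty]) (hne : ¬ [cx, cy] = [tx, ty])
    (h1 : ¬ cx > tx) (h2 : ¬ cx < tx) (h3 : ¬ cy > ty) :
    mrDist points [cx, cy + 1] (r :: rest) < mrDist points [cx, cy] (r :: rest) := by
  simp only [mrDist, hT]
  have hx : cx = tx := by omega
  have hy : cy ≠ ty := fun h => hne (by rw [hx, h])
  omega

-- the while-loop of moving_route: cur = mr[-1], returns the cells appended after cur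
def mrGo (points : List (List Int)) (cur : List Int) (route : List Int) : List (List Int) :=
  match route with
  | [] => []
  | r :: rest =>
    match hT : PySem.List.pyGet? points (r - 1) with
    | none => []   -- Python IndexError; excluded by Pre_
    | some target =>
      if hEq : cur = target then
        mrGo points cur rest
      else
        match hc : cur, ht : target with
        | [cx, cy], [tx, ty] =>
          if h1 : cx > tx then [cx - 1, cy] :: mrGo points [cx - 1, cy] (r :: rest)
          else if h2 : cx < tx then [cx + 1, cy] :: mrGo points [cx + 1, cy] (r :: rest)
          else if h3 : cy > ty then [cx, cy - 1] :: mrGo points [cx, cy - 1] (r :: rest)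
          else [cx, cy + 1] :: mrGo points [cx, cy + 1] (r :: rest)
        | _, _ => []   -- Python raises IndexError or never terminates here; excluded by Pre_
termination_by (route.length, mrDist points cur route)
decreasing_by
  · exact pvLexLeft _ _ _ _ (Nat.lt_succ_self _)
  · exact pvLexRight _ _ _ (mrDistDec1 points r rest cx cy tx ty hT h1)
  · exact pvLexRight _ _ _ (mrDistDec2 points r rest cx cy tx ty hT h2)
  · exact pvLexRight _ _ _ (mrDistDec3 points r rest cx cy tx ty hT h3)
  · exact pvLexRight _ _ _ (mrDistDec4 points r rest cx cy tx ty hT hEq h1 h2 h3)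

def movingRoute (points : List (List Int)) (route : List Int) : List (List Int) :=
  match route with
  | [] => []   -- Python: route.pop(0) raises IndexError; excluded by Pre_
  | r :: rest =>
    match PySem.List.pyGet? points (r - 1) with
    | none => []   -- Python IndexError; excluded by Pre_
    | some p0 => p0 :: mrGo points p0 rest

def dictInit : PySem.Dict Int Int := (PySem.Dict.empty : PySem.Dict Int Int).insert (-1) 0

-- the body of A's inner `for mr in mrs` once `now` has been computed
def step2 (acc : PySem.Dict Int Int × Int) (v : Int) : PySem.Dict Int Int × Int :=
  if acc.1.contains v then
    ((acc.1.modify v 0 (· + 1)).modify (-1) 0 (· + 1),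
      if acc.1.getD v 0 = 1 then acc.2 + 1 else acc.2)
  else
    ((acc.1.insert v 1).modify (-1) 0 (· + 1), acc.2)

def stepA (i : Nat) (acc : PySem.Dict Int Int × Int) (mr : List (List Int)) :
    PySem.Dict Int Int × Int :=
  if i < mr.length then step2 acc (nowKey (mr.getD i [])) else acc

def maxLenA (mrs : List (List (List Int))) : Nat :=
  mrs.foldl (fun a mr => max a mr.length) 0

-- A's `while True` loop (terminates: once i reaches every path length the sentinel stays ≤ 1)
theorem loopA_dec (mrs : List (List (List Int))) (i : Nat) (answer : Int)
    (h : ¬ (mrs.foldl (stepA i) (dictInit, answer)).1.getD (-1) 0 ≤ 1) :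
    maxLenA mrs - (i + 1) < maxLenA mrs - i := by
  by_contra hlt
  have hle : maxLenA mrs ≤ i := by omega
  have hall : ∀ mr ∈ mrs, ¬ i < mr.length := by
    intro mr hmr
    have := (PySem.List.le_foldl_max_nat mrs (fun mr => mr.length) 0).2 mr hmr
    simp only [maxLenA] at hle; omega
  have h3 : List.foldl (stepA i) (dictInit, answer) mrs = (dictInit, answer) := by
    rw [PySem.List.foldl_congr_mem mrs (stepA i) (fun acc _ => acc) (dictInit, answer)
      (by intro acc mr hmr; simp [stepA, hall mr hmr])]
    exact PySem.List.foldl_ignore _ _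
  rw [h3] at h
  exact h (by show dictInit.getD (-1) 0 ≤ 1; decide)

def loopA (mrs : List (List (List Int))) (i : Nat) (answer : Int) : Int :=
  let st := mrs.foldl (stepA i) (dictInit, answer)
  if st.1.getD (-1) 0 ≤ 1 then st.2 else loopA mrs (i + 1) st.2
termination_by maxLenA mrs - i
decreasing_by
  rename_i h
  exact loopA_dec mrs i answer (by
    have h2 : ¬ (mrs.attach.foldl (fun s x => stepA i s x.1) (dictInit, answer)).1.getD (-1) 0 ≤ 1 := h
    rwa [List.foldl_attach] at h2)

def solution (points : List (List Int)) (routes : List (List Int)) : Int :=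
  let mrs := routes.foldl (fun acc route => acc ++ [movingRoute points route]) []
  loopA mrs 0 0

-- ===== PORT B =====

-- one x-leg: `for nx in range(x + sx, tx + sx, sx): cells.append([nx, y])`
def legX (x y tx : Int) : List (List Int) :=
  let sx : Int := if tx ≥ x then 1 else -1
  (PySem.List.pyRange (x + sx) (tx + sx) sx).map (fun nx => [nx, y])

-- one y-leg: `for ny in range(y + sy, ty + sy, sy): cells.append([tx, ny])`
def legY (tx y ty : Int) : List (List Int) :=
  let sy : Int := if ty ≥ y then 1 else -1
  (PySem.List.pyRange (y + sy) (ty + sy) sy).map (fun ny => [tx, ny])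

-- the `for idx in route[1:]` loop of B's path helper, carrying (x, y)
def legsB (points : List (List Int)) (x y : Int) (rest : List Int) : List (List Int) :=
  match rest with
  | [] => []
  | r :: rest' =>
    match PySem.List.pyGet? points (r - 1) with
    | some [tx, ty] => legX x y tx ++ legY tx y ty ++ legsB points tx ty rest'
    | _ => []   -- Python IndexError / unpacking ValueError; excluded by Pre_

def pathB (points : List (List Int)) (route : List Int) : List (List Int) :=
  match route with
  | [] => []   -- Python IndexError; excluded by Pre_
  | r :: rest =>
    match PySem.List.pyGet? points (r - 1) with
    | some [x, y] => [x, y] :: legsB points x y rest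
    | _ => []   -- Python IndexError / unpacking ValueError; excluded by Pre_

def solution_alt (points : List (List Int)) (routes : List (List Int)) : Int :=
  let counter := routes.foldl (fun d route =>
      (PySem.List.enumerate (pathB points route) 0).foldl
        (fun d p => d.insert (p.1, nowKey p.2) (d.getD (p.1, nowKey p.2) 0 + 1)) d)
    (PySem.Dict.empty : PySem.Dict (Int × Int) Int)
  counter.values.foldl (fun a v => if 2 ≤ v then a + 1 else a) 0

-- ===== PRECONDITION & SPEC =====

def goodTarget (points : List (List Int)) (r : Int) : Bool :=
  match PySem.List.pyGet? points (r - 1) with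
  | some [x, y] => 1 ≤ x && 1 ≤ y
  | _ => false

-- Pre_ excludes inputs where A raises IndexError (an empty route, a route index out of range)
-- or loops forever (a referenced point that is not a coordinate pair), and restricts
-- coordinates to the problem's grid (≥ 1), outside which A's -1 dictionary sentinel can
-- collide with a cell key and silently miscount (and A still returns on a few degenerate
-- non-pair inputs that need no movement).
def Pre_solution (points : List (List Int)) (routes : List (List Int)) : Prop :=
  ∀ route ∈ routes, route ≠ [] ∧ ∀ r ∈ route, goodTarget points r = true
instance (points : List (List Int)) (routes : List (List Int)) :
    Decidable (Pre_solution points routes) := by unfold Pre_solution; infer_instance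

def pvWitness_solution : List (List Int) × List (List Int) :=
  ([[1, 1], [2, 2]], [[1, 2], [2]])

def Spec_solution (points : List (List Int)) (routes : List (List Int)) (out : Int) : Prop :=
  out = solution_alt points routes
instance (points : List (List Int)) (routes : List (List Int)) (out : Int) :
    Decidable (Spec_solution points routes out) := by unfold Spec_solution; infer_instance

-- ===== CLAIM (what is proved, stated in full; the proofs are below) =====
def Claim_equal_solution : Prop := ∀ (points : List (List Int)) (routes : List (List Int)), Dom_solution points routes → Pre_solution points routes → Spec_solution points routes (solution points routes)

-- ===== LEMMAS AND PROOFS =====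

-- the multiset of now-keys of the robots active at time i
def Kt (mrs : List (List (List Int))) (i : Nat) : List Int :=
  (mrs.filter (fun mr => decide (i < mr.length))).map (fun mr => nowKey (mr.getD i []))

-- number of distinct values occurring at least twice
def dupCnt (l : List Int) : Nat :=
  (PySem.Set.ofList l).countP (fun v => decide (2 ≤ l.count v))

-- == cell shape: under Pre_, every path cell is a coordinate pair with entries ≥ 1 ==

theorem nowKey_pair (x y : Int) : nowKey [x, y] = (x - 1) * 100 + y - 1 := by
  simp [nowKey, PySem.List.pyGetD, PySem.List.pyGet?, PySem.List.pyIdx?]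

theorem goodTarget_spec (points : List (List Int)) (r : Int) (tgt : List Int)
    (hg : goodTarget points r = true) (h : PySem.List.pyGet? points (r - 1) = some tgt) :
    ∃ tx ty, tgt = [tx, ty] ∧ 1 ≤ tx ∧ 1 ≤ ty := by
  unfold goodTarget at hg
  rw [h] at hg
  match tgt, hg with
  | [tx, ty], hg =>
    simp only [Bool.and_eq_true, decide_eq_true_eq] at hg
    exact ⟨tx, ty, rfl, hg.1, hg.2⟩

theorem goodTarget_pair (points : List (List Int)) (r : Int)
    (hg : goodTarget points r = true) :
    ∃ tx ty, PySem.List.pyGet? points (r - 1) = some [tx, ty] := by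
  unfold goodTarget at hg
  cases h : PySem.List.pyGet? points (r - 1) with
  | none => rw [h] at hg; exact absurd hg (by simp)
  | some tgt =>
    obtain ⟨tx, ty, rfl, -, -⟩ := goodTarget_spec points r tgt hg h
    exact ⟨tx, ty, rfl⟩

-- == unfolding equations for mrGo ==

theorem mrGo_nil (points : List (List Int)) (cur : List Int) : mrGo points cur [] = [] := by
  rw [mrGo]

theorem mrGo_err (points : List (List Int)) (cur : List Int) (r : Int) (rest : List Int)
    (h : PySem.List.pyGet? points (r - 1) = none) : mrGo points cur (r :: rest) = [] := by
  rw [mrGo]; split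
  · rfl
  · rename_i t heq; rw [h] at heq; exact absurd heq (by simp)

theorem mrGo_pop (points : List (List Int)) (cur : List Int) (r : Int) (rest : List Int)
    (target : List Int) (h : PySem.List.pyGet? points (r - 1) = some target)
    (he : cur = target) : mrGo points cur (r :: rest) = mrGo points cur rest := by
  rw [mrGo]; split
  · rename_i heq; rw [h] at heq; exact absurd heq (by simp)
  · rename_i t heq; rw [h] at heq
    injection heq with heq; subst heq
    rw [dif_pos he]

theorem mrGo_move (points : List (List Int)) (cx cy : Int) (r : Int) (rest : List Int)
    (tx ty : Int) (h : PySem.List.pyGet? points (r - 1) = some [tx, ty])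
    (hne : [cx, cy] ≠ [tx, ty]) :
    mrGo points [cx, cy] (r :: rest) =
      (if tx < cx then [cx - 1, cy]
       else if cx < tx then [cx + 1, cy]
       else if ty < cy then [cx, cy - 1]
       else [cx, cy + 1]) ::
      mrGo points
        (if tx < cx then [cx - 1, cy]
         else if cx < tx then [cx + 1, cy]
         else if ty < cy then [cx, cy - 1]
         else [cx, cy + 1]) (r :: rest) := by
  rw [mrGo]; split
  · rename_i heq; rw [h] at heq; exact absurd heq (by simp)
  · rename_i t heq; rw [h] at heq
    injection heq with heq; subst heq
    rw [dif_neg hne]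
    by_cases h1 : tx < cx <;> by_cases h2 : cx < tx <;> by_cases h3 : ty < cy <;>
      simp [h1, h2, h3, gt_iff_lt]

theorem mrGo_cells (points : List (List Int)) (cur : List Int) (route : List Int)
    (hroute : ∀ r ∈ route, goodTarget points r = true)
    (hcur : ∃ cx cy, cur = [cx, cy] ∧ 1 ≤ cx ∧ 1 ≤ cy) :
    ∀ cell ∈ mrGo points cur route, ∃ x y, cell = [x, y] ∧ 1 ≤ x ∧ 1 ≤ y := by
  revert hroute hcur
  induction cur, route using mrGo.induct (points := points) with
  | case1 cur =>
    intro _ _ cell hcell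
    simp [mrGo_nil] at hcell
  | case2 cur r tail hT =>
    intro _ _ cell hcell
    rw [mrGo_err _ _ _ _ hT] at hcell
    simp at hcell
  | case3 r tail target hT ih =>
    intro hroute hcur cell hcell
    rw [mrGo_pop _ _ _ _ _ hT rfl] at hcell
    exact ih (fun r' hr' => hroute r' (List.mem_cons_of_mem _ hr')) hcur cell hcell
  | case4 r tail cx cy tx ty hT hne h1 ih =>
    intro hroute hcur cell hcell
    rw [mrGo_move _ _ _ _ _ _ _ hT hne, if_pos h1] at hcell
    obtain ⟨tx', ty', htgt, htx, hty⟩ := goodTarget_spec points r _ (hroute r (by simp)) hT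
    obtain ⟨cx', cy', heq, hcx, hcy⟩ := hcur
    have hcx : 1 ≤ cx := by injection heq with a b; omega
    have hcy : 1 ≤ cy := by injection heq with a b; injection b with c d; omega
    have htx : 1 ≤ tx := by injection htgt with a b; omega
    rcases List.mem_cons.mp hcell with rfl | hcell
    · exact ⟨cx - 1, cy, rfl, by omega, hcy⟩
    · exact ih hroute ⟨cx - 1, cy, rfl, by omega, hcy⟩ cell hcell
  | case5 r tail cx cy tx ty hT hne h1 h2 ih =>
    intro hroute hcur cell hcell
    rw [mrGo_move _ _ _ _ _ _ _ hT hne, if_neg (by omega), if_pos h2] at hcell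
    obtain ⟨cx', cy', heq, hcx, hcy⟩ := hcur
    have hcx : 1 ≤ cx := by injection heq with a b; omega
    have hcy : 1 ≤ cy := by injection heq with a b; injection b with c d; omega
    rcases List.mem_cons.mp hcell with rfl | hcell
    · exact ⟨cx + 1, cy, rfl, by omega, hcy⟩
    · exact ih hroute ⟨cx + 1, cy, rfl, by omega, hcy⟩ cell hcell
  | case6 r tail cx cy tx ty hT hne h1 h2 h3 ih =>
    intro hroute hcur cell hcell
    rw [mrGo_move _ _ _ _ _ _ _ hT hne, if_neg (by omega), if_neg (by omega),
      if_pos h3] at hcell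
    obtain ⟨tx', ty', htgt, htx, hty⟩ := goodTarget_spec points r _ (hroute r (by simp)) hT
    obtain ⟨cx', cy', heq, hcx, hcy⟩ := hcur
    have hcx : 1 ≤ cx := by injection heq with a b; omega
    have hty : 1 ≤ ty := by injection htgt with a b; injection b with c d; omega
    rcases List.mem_cons.mp hcell with rfl | hcell
    · exact ⟨cx, cy - 1, rfl, hcx, by omega⟩
    · exact ih hroute ⟨cx, cy - 1, rfl, hcx, by omega⟩ cell hcell
  | case7 r tail cx cy tx ty hT hne h1 h2 h3 ih =>
    intro hroute hcur cell hcell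
    rw [mrGo_move _ _ _ _ _ _ _ hT hne, if_neg (by omega), if_neg (by omega),
      if_neg (by omega)] at hcell
    obtain ⟨cx', cy', heq, hcx, hcy⟩ := hcur
    have hcx : 1 ≤ cx := by injection heq with a b; omega
    have hcy : 1 ≤ cy := by injection heq with a b; injection b with c d; omega
    rcases List.mem_cons.mp hcell with rfl | hcell
    · exact ⟨cx, cy + 1, rfl, hcx, by omega⟩
    · exact ih hroute ⟨cx, cy + 1, rfl, hcx, by omega⟩ cell hcell
  | case8 cur r tail target hT hEq hcontra =>
    intro hroute hcur cell hcell
    obtain ⟨cx, cy, rfl, hcx, hcy⟩ := hcur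
    obtain ⟨tx, ty, rfl, htx, hty⟩ := goodTarget_spec points r _ (hroute r (by simp)) hT
    exact (hcontra cx cy tx ty hT hEq rfl rfl (proof_irrel_heq _ _) (proof_irrel_heq _ _)).elim

theorem movingRoute_cells (points : List (List Int)) (route : List Int)
    (hroute : ∀ r ∈ route, goodTarget points r = true) :
    ∀ cell ∈ movingRoute points route, ∃ x y, cell = [x, y] ∧ 1 ≤ x ∧ 1 ≤ y := by
  match route with
  | [] => intro cell hcell; simp [movingRoute] at hcell
  | r :: rest =>
    intro cell hcell
    rw [movingRoute] at hcell
    cases hT : PySem.List.pyGet? points (r - 1) with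
    | none => rw [hT] at hcell; simp at hcell
    | some p0 =>
      rw [hT] at hcell
      obtain ⟨x, y, rfl, hx, hy⟩ := goodTarget_spec points r p0 (hroute r (by simp)) hT
      rcases List.mem_cons.mp hcell with rfl | hcell
      · exact ⟨x, y, rfl, hx, hy⟩
      · exact mrGo_cells points _ rest (fun r' hr' => hroute r' (List.mem_cons_of_mem _ hr'))
          ⟨x, y, rfl, hx, hy⟩ cell hcell

theorem nowKey_nonneg (cell : List Int) (h : ∃ x y, cell = [x, y] ∧ 1 ≤ x ∧ 1 ≤ y) :
    0 ≤ nowKey cell := by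
  obtain ⟨x, y, rfl, hx, hy⟩ := h
  rw [nowKey_pair]
  omega

-- == A's walk equals B's legs: legX/legY peel off one cell at a time ==

theorem legX_self (x y : Int) : legX x y x = [] := by
  simp [legX, PySem.List.pyRange_one_eq_nil (by omega : x + 1 ≤ x + 1)]

theorem legY_self (tx y : Int) : legY tx y y = [] := by
  simp [legY, PySem.List.pyRange_one_eq_nil (by omega : y + 1 ≤ y + 1)]

theorem legX_down (x y tx : Int) (h : tx < x) : legX x y tx = [x - 1, y] :: legX (x - 1) y tx := by
  by_cases h2 : tx = x - 1
  · rw [h2, legX_self]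
    simp only [legX]
    rw [if_neg (by omega)]
    rw [show x + (-1 : Int) = x - 1 by ring, show (x - 1) + (-1 : Int) = x - 1 - 1 by ring]
    rw [PySem.List.pyRange_neg_one_cons (by omega : x - 1 - 1 < x - 1),
      PySem.List.pyRange_neg_one_eq_nil (by omega : x - 1 - 1 ≤ x - 1 - 1)]
    simp
  · simp only [legX]
    rw [if_neg (by omega), if_neg (by omega)]
    rw [show x + (-1 : Int) = x - 1 by ring, show tx + (-1 : Int) = tx - 1 by ring,
      show (x - 1) + (-1 : Int) = x - 1 - 1 by ring]
    rw [PySem.List.pyRange_neg_one_cons (by omega : tx - 1 < x - 1)]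
    rfl

theorem legX_up (x y tx : Int) (h : x < tx) : legX x y tx = [x + 1, y] :: legX (x + 1) y tx := by
  simp only [legX]
  rw [if_pos (by omega), if_pos (by omega)]
  rw [PySem.List.pyRange_one_cons (by omega : x + 1 < tx + 1)]
  rfl

theorem legY_down (tx y ty : Int) (h : ty < y) : legY tx y ty = [tx, y - 1] :: legY tx (y - 1) ty := by
  by_cases h2 : ty = y - 1
  · rw [h2, legY_self]
    simp only [legY]
    rw [if_neg (by omega)]
    rw [show y + (-1 : Int) = y - 1 by ring, show (y - 1) + (-1 : Int) = y - 1 - 1 by ring]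
    rw [PySem.List.pyRange_neg_one_cons (by omega : y - 1 - 1 < y - 1),
      PySem.List.pyRange_neg_one_eq_nil (by omega : y - 1 - 1 ≤ y - 1 - 1)]
    simp
  · simp only [legY]
    rw [if_neg (by omega), if_neg (by omega)]
    rw [show y + (-1 : Int) = y - 1 by ring, show ty + (-1 : Int) = ty - 1 by ring,
      show (y - 1) + (-1 : Int) = y - 1 - 1 by ring]
    rw [PySem.List.pyRange_neg_one_cons (by omega : ty - 1 < y - 1)]
    rfl

theorem legY_up (tx y ty : Int) (h : y < ty) : legY tx y ty = [tx, y + 1] :: legY tx (y + 1) ty := by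
  simp only [legY]
  rw [if_pos (by omega), if_pos (by omega)]
  rw [PySem.List.pyRange_one_cons (by omega : y + 1 < ty + 1)]
  rfl

theorem mrGo_leg (points : List (List Int)) (r : Int) (rest : List Int) (tx ty : Int)
    (hT : PySem.List.pyGet? points (r - 1) = some [tx, ty]) :
    ∀ (n : Nat) (x y : Int), (x - tx).natAbs + (y - ty).natAbs ≤ n →
      mrGo points [x, y] (r :: rest) =
        legX x y tx ++ legY tx y ty ++ mrGo points [tx, ty] rest := by
  intro n
  induction n with
  | zero =>
    intro x y hd
    have hx : x = tx := by omega
    have hy : y = ty := by omega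
    subst hx; subst hy
    rw [mrGo_pop _ _ _ _ _ hT rfl, legX_self, legY_self]
    rfl
  | succ n ih =>
    intro x y hd
    by_cases hx : x = tx
    · by_cases hy : y = ty
      · rw [hx, hy, mrGo_pop _ _ _ _ _ hT rfl, legX_self, legY_self]
        rfl
      · have hne : [x, y] ≠ [tx, ty] := by simp [hy]
        rw [mrGo_move _ _ _ _ _ _ _ hT hne, if_neg (by omega), if_neg (by omega)]
        by_cases h3 : ty < y
        · rw [if_pos h3, ih x (y - 1) (by omega), hx, legY_down _ _ _ h3]
          simp [legX_self]
        · have h4 : y < ty := by omega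
          rw [if_neg h3, ih x (y + 1) (by omega), hx, legY_up _ _ _ h4]
          simp [legX_self]
    · have hne : [x, y] ≠ [tx, ty] := by simp [hx]
      rw [mrGo_move _ _ _ _ _ _ _ hT hne]
      by_cases h1 : tx < x
      · rw [if_pos h1, ih (x - 1) y (by omega), legX_down _ _ _ h1]
        simp
      · have h2 : x < tx := by omega
        rw [if_neg h1, if_pos h2, ih (x + 1) y (by omega), legX_up _ _ _ h2]
        simp

theorem mrGo_eq_legsB (points : List (List Int)) (rest : List Int) :
    ∀ (x y : Int), (∀ r ∈ rest, goodTarget points r = true) →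
      mrGo points [x, y] rest = legsB points x y rest := by
  induction rest with
  | nil => intro x y _; rw [mrGo_nil]; rfl
  | cons r rest' ih =>
    intro x y hroute
    obtain ⟨tx, ty, hT⟩ := goodTarget_pair points r (hroute r (by simp))
    rw [mrGo_leg points r rest' tx ty hT ((x - tx).natAbs + (y - ty).natAbs) x y (by omega)]
    rw [ih tx ty (fun r' hr' => hroute r' (List.mem_cons_of_mem _ hr'))]
    simp [legsB, hT]

theorem movingRoute_eq_pathB (points : List (List Int)) (route : List Int)
    (hroute : ∀ r ∈ route, goodTarget points r = true) :
    movingRoute points route = pathB points route := by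
  match route with
  | [] => rfl
  | r :: rest =>
    obtain ⟨x, y, hT⟩ := goodTarget_pair points r (hroute r (by simp))
    simp only [movingRoute, pathB, hT]
    rw [mrGo_eq_legsB points rest x y (fun r' hr' => hroute r' (List.mem_cons_of_mem _ hr'))]

-- == A-side: the per-time fold counts the duplicated keys ==

theorem Kt_cons (mr : List (List Int)) (mrs : List (List (List Int))) (i : Nat) :
    Kt (mr :: mrs) i =
      if i < mr.length then nowKey (mr.getD i []) :: Kt mrs i else Kt mrs i := by
  simp only [Kt, List.filter_cons]
  by_cases h : i < mr.length <;> simp [h]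

theorem Kt_nonneg (mrs : List (List (List Int))) (i : Nat)
    (H : ∀ mr ∈ mrs, ∀ cell ∈ mr, 0 ≤ nowKey cell) : ∀ v ∈ Kt mrs i, 0 ≤ v := by
  intro v hv
  simp only [Kt, List.mem_map, List.mem_filter, decide_eq_true_eq] at hv
  obtain ⟨mr, ⟨hmr, hlen⟩, rfl⟩ := hv
  rw [List.getD_eq_getElem _ _ hlen]
  exact H mr hmr _ (List.getElem_mem hlen)

theorem Kt_len_mono (mrs : List (List (List Int))) {i j : Nat} (h : i ≤ j) :
    (Kt mrs j).length ≤ (Kt mrs i).length := by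
  simp only [Kt, List.length_map, ← List.countP_eq_length_filter]
  exact List.countP_mono_left (by
    intro mr _ hmr
    simp only [decide_eq_true_eq] at *
    omega)

theorem dupCnt_short (l : List Int) (h : l.length ≤ 1) : dupCnt l = 0 := by
  match l with
  | [] => rfl
  | [v] =>
    simp [dupCnt, PySem.Set.ofList_eq_foldl, PySem.Set.add, PySem.Set.contains,
      List.count_singleton]
  | a :: b :: t => simp at h

theorem dupCnt_append_singleton (p : List Int) (v : Int) :
    dupCnt (p ++ [v]) = dupCnt p + (if p.count v = 1 then 1 else 0) := by
  have hset : PySem.Set.ofList (p ++ [v]) = PySem.Set.add (PySem.Set.ofList p) v := by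
    simp [PySem.Set.ofList_eq_foldl, List.foldl_append]
  by_cases hv : v ∈ p
  · have hadd : PySem.Set.add (PySem.Set.ofList p) v = PySem.Set.ofList p := by
      rw [PySem.Set.add_eq_ite]; simp [PySem.Set.mem_ofList, hv]
    have hmem : v ∈ PySem.Set.ofList p := (PySem.Set.mem_ofList p v).mpr hv
    have hnd : (PySem.Set.ofList p).Nodup := PySem.Set.nodup_ofList p
    have hperm := List.perm_cons_erase hmem
    rw [dupCnt, hset, hadd, dupCnt, hperm.countP_eq, hperm.countP_eq]
    simp only [List.countP_cons]
    have htail : List.countP (fun u => decide (2 ≤ (p ++ [v]).count u))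
        ((PySem.Set.ofList p).erase v)
        = List.countP (fun u => decide (2 ≤ p.count u)) ((PySem.Set.ofList p).erase v) := by
      apply List.countP_congr
      intro u hu
      have hne : u ≠ v := (hnd.mem_erase_iff.mp hu).1
      rw [List.count_append]
      simp [Ne.symm hne]
    rw [htail]
    have hcv : 1 ≤ p.count v := List.one_le_count_iff.mpr hv
    have hcnt : (p ++ [v]).count v = p.count v + 1 := by
      rw [List.count_append]; simp
    rw [hcnt]
    by_cases h1 : p.count v = 1
    · simp [h1]
    · have h2 : 2 ≤ p.count v := by omega
      simp [h2, (by omega : 2 ≤ p.count v + 1), h1]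
  · have hadd : PySem.Set.add (PySem.Set.ofList p) v = PySem.Set.ofList p ++ [v] := by
      rw [PySem.Set.add_eq_ite]; simp [PySem.Set.mem_ofList, hv]
    rw [dupCnt, hset, hadd, List.countP_append]
    have hcv : p.count v = 0 := List.count_eq_zero_of_not_mem hv
    have htail : List.countP (fun u => decide (2 ≤ (p ++ [v]).count u)) (PySem.Set.ofList p)
        = List.countP (fun u => decide (2 ≤ p.count u)) (PySem.Set.ofList p) := by
      apply List.countP_congr
      intro u hu
      have hne : u ≠ v := by
        intro h; subst h; exact hv ((PySem.Set.mem_ofList p u).mp hu)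
      rw [List.count_append]
      simp [Ne.symm hne]
    rw [htail]
    simp [dupCnt, List.count_append, hcv]

-- the fold of step2 over the active keys: dictionary invariant
theorem step2_run (l : List Int) (hl : ∀ v ∈ l, 0 ≤ v) :
    ∀ (d : PySem.Dict Int Int) (a : Int) (processed : List Int),
    (∀ v : Int, 0 ≤ v → d.getD v 0 = processed.count v) →
    (∀ v : Int, 0 ≤ v → (d.contains v = true ↔ v ∈ processed)) →
    d.getD (-1) 0 = processed.length →
    (l.foldl step2 (d, a)).2 = a + ((dupCnt (processed ++ l) : Int) - (dupCnt processed : Int))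
    ∧ (l.foldl step2 (d, a)).1.getD (-1) 0 = ((processed ++ l).length : Int) := by
  induction l with
  | nil =>
    intro d a processed h1 h2 h3
    simp [h3]
  | cons v l ih =>
    intro d a processed h1 h2 h3
    have hv : (0:Int) ≤ v := hl v (by simp)
    have hl' : ∀ u ∈ l, (0:Int) ≤ u := fun u hu => hl u (List.mem_cons_of_mem _ hu)
    have hvne : v ≠ -1 := by omega
    have hkey : dupCnt (processed ++ [v]) =
        dupCnt processed + (if processed.count v = 1 then 1 else 0) :=
      dupCnt_append_singleton processed v
    simp only [List.foldl_cons]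
    by_cases hc : d.contains v = true
    · have hmem : v ∈ processed := (h2 v hv).mp hc
      have hstep : step2 (d, a) v =
          ((d.modify v 0 (· + 1)).modify (-1) 0 (· + 1),
            if d.getD v 0 = 1 then a + 1 else a) := by
        simp [step2, hc]
      rw [hstep]
      have h1' : ∀ u : Int, 0 ≤ u →
          ((d.modify v 0 (· + 1)).modify (-1) 0 (· + 1)).getD u 0 = (processed ++ [v]).count u := by
        intro u hu
        have hune : u ≠ -1 := by omega
        rw [PySem.Dict.getD_modify_of_ne _ _ _ hune, PySem.Dict.getD_modify]
        by_cases huv : u = v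
        · subst huv; simp [h1 u hu, List.count_append]
        · simp [huv, h1 u hu, List.count_append, Ne.symm huv]
      have h2' : ∀ u : Int, 0 ≤ u →
          (((d.modify v 0 (· + 1)).modify (-1) 0 (· + 1)).contains u = true ↔
            u ∈ processed ++ [v]) := by
        intro u hu
        have hune : u ≠ -1 := by omega
        simp only [PySem.Dict.contains_modify, beq_iff_eq, hune, Bool.or_eq_true]
        rcases eq_or_ne u v with rfl | huv
        · simp [hmem]
        · simp [huv, h2 u hu, hune]
      have h3' : ((d.modify v 0 (· + 1)).modify (-1) 0 (· + 1)).getD (-1) 0 =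
          ((processed ++ [v]).length : Int) := by
        rw [PySem.Dict.getD_modify_self,
          PySem.Dict.getD_modify_of_ne _ _ _ (by omega : (-1:Int) ≠ v), h3]
        simp
      obtain ⟨ha, hb⟩ := ih hl' _ _ (processed ++ [v]) h1' h2' h3'
      constructor
      · rw [ha, h1 v hv, hkey, List.append_cons]
        by_cases h1c : processed.count v = 1 <;> simp [h1c] <;> push_cast <;> ring
      · rw [hb]; simp
    · have hnm : v ∉ processed := fun hmm => hc ((h2 v hv).mpr hmm)
      have hstep : step2 (d, a) v = ((d.insert v 1).modify (-1) 0 (· + 1), a) := by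
        simp [step2, hc]
      rw [hstep]
      have h1' : ∀ u : Int, 0 ≤ u →
          ((d.insert v 1).modify (-1) 0 (· + 1)).getD u 0 = (processed ++ [v]).count u := by
        intro u hu
        have hune : u ≠ -1 := by omega
        rw [PySem.Dict.getD_modify_of_ne _ _ _ hune, PySem.Dict.getD_insert]
        by_cases huv : u = v
        · subst huv
          simp [List.count_append, List.count_eq_zero_of_not_mem hnm]
        · simp [huv, h1 u hu, List.count_append, Ne.symm huv]
      have h2' : ∀ u : Int, 0 ≤ u →
          (((d.insert v 1).modify (-1) 0 (· + 1)).contains u = true ↔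
            u ∈ processed ++ [v]) := by
        intro u hu
        have hune : u ≠ -1 := by omega
        simp only [PySem.Dict.contains_modify, PySem.Dict.contains_insert, beq_iff_eq, hune,
          Bool.or_eq_true]
        rcases eq_or_ne u v with rfl | huv
        · simp
        · simp [huv, h2 u hu, hune]
      have h3' : ((d.insert v 1).modify (-1) 0 (· + 1)).getD (-1) 0 =
          ((processed ++ [v]).length : Int) := by
        rw [PySem.Dict.getD_modify_self, PySem.Dict.getD_insert, if_neg (by omega), h3]
        simp
      obtain ⟨ha, hb⟩ := ih hl' _ _ (processed ++ [v]) h1' h2' h3'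
      constructor
      · rw [ha, hkey, List.append_cons]
        simp [List.count_eq_zero_of_not_mem hnm]
      · rw [hb]; simp

theorem foldl_stepA (mrs : List (List (List Int))) (i : Nat) (d : PySem.Dict Int Int) (a : Int) :
    mrs.foldl (stepA i) (d, a) = (Kt mrs i).foldl step2 (d, a) := by
  show _ = ((mrs.filter (fun mr => decide (i < mr.length))).map
    (fun mr => nowKey (mr.getD i []))).foldl step2 (d, a)
  rw [List.foldl_map, ← PySem.List.foldl_ite_eq_foldl_filter
    (fun mr : List (List Int) => i < mr.length)
    (fun acc mr => step2 acc (nowKey (mr.getD i []))) mrs (d, a)]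
  rfl

theorem Kt_nil_of_max_le (mrs : List (List (List Int))) (i : Nat) (h : maxLenA mrs ≤ i) :
    Kt mrs i = [] := by
  simp only [Kt, List.map_eq_nil_iff, List.filter_eq_nil_iff]
  intro mr hmr
  have := (PySem.List.le_foldl_max_nat mrs (fun mr => mr.length) 0).2 mr hmr
  simp only [maxLenA] at h
  simp only [decide_eq_true_eq]
  omega

theorem loopA_sum (mrs : List (List (List Int)))
    (H : ∀ mr ∈ mrs, ∀ cell ∈ mr, 0 ≤ nowKey cell) :
    ∀ (n i : Nat) (a : Int), maxLenA mrs - i ≤ n →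
    loopA mrs i a =
      a + ((List.range' i (maxLenA mrs - i)).map (fun j => (dupCnt (Kt mrs j) : Int))).sum := by
  intro n
  induction n with
  | zero =>
    intro i a h
    have hM : maxLenA mrs ≤ i := by omega
    have hK : Kt mrs i = [] := Kt_nil_of_max_le mrs i hM
    rw [loopA]
    simp only [foldl_stepA, hK, List.foldl_nil]
    have : maxLenA mrs - i = 0 := by omega
    rw [this]
    simp [dictInit, PySem.Dict.getD_insert_self]
  | succ n ih =>
    intro i a h
    obtain ⟨ha, hb⟩ := step2_run (Kt mrs i) (Kt_nonneg mrs i H) dictInit a []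
      (by intro v hv
          simp [dictInit, PySem.Dict.getD_insert])
      (by intro v hv
          simp [dictInit, PySem.Dict.contains_insert, PySem.Dict.contains_empty]
          omega)
      (by simp [dictInit, PySem.Dict.getD_insert_self])
    simp only [List.nil_append] at ha hb
    by_cases hM : maxLenA mrs ≤ i
    · have hK : Kt mrs i = [] := Kt_nil_of_max_le mrs i hM
      rw [loopA]
      simp only [foldl_stepA, hK, List.foldl_nil]
      have : maxLenA mrs - i = 0 := by omega
      rw [this]
      simp [dictInit, PySem.Dict.getD_insert_self]
    · have hiM : i < maxLenA mrs := by omega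
      rw [loopA]
      simp only [foldl_stepA]
      rw [ha, hb]
      have hsplit : maxLenA mrs - i = (maxLenA mrs - (i + 1)) + 1 := by omega
      by_cases hlen : ((Kt mrs i).length : Int) ≤ 1
      · rw [if_pos hlen, hsplit, List.range'_succ]
        have htail : ((List.range' (i + 1) (maxLenA mrs - (i + 1))).map
            (fun j => (dupCnt (Kt mrs j) : Int))).sum = 0 := by
          apply List.sum_eq_zero
          intro x hx
          simp only [List.mem_map] at hx
          obtain ⟨j, hj, rfl⟩ := hx
          have hij : i ≤ j := by
            have := (List.mem_range'_1.mp hj).1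
            omega
          have : (Kt mrs j).length ≤ 1 := by
            have := Kt_len_mono mrs hij
            omega
          rw [dupCnt_short _ this]
          rfl
        simp only [List.map_cons, List.sum_cons, htail]
        have h0 : (dupCnt ([] : List Int) : Int) = 0 := rfl
        rw [h0]
        ring
      · rw [if_neg hlen]
        rw [ih (i + 1) (a + ((dupCnt (Kt mrs i) : Int) - (dupCnt ([] : List Int) : Int)))
          (by omega)]
        rw [hsplit, List.range'_succ]
        simp only [List.map_cons, List.sum_cons]
        have : (dupCnt ([] : List Int) : Int) = 0 := rfl
        rw [this]
        ring

theorem solutionA_sum (points : List (List Int)) (routes : List (List Int))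
    (H : ∀ mr ∈ routes.map (fun route => movingRoute points route), ∀ cell ∈ mr, 0 ≤ nowKey cell) :
    solution points routes =
      ((List.range' 0 (maxLenA (routes.map (fun route => movingRoute points route)))).map
        (fun j => (dupCnt (Kt (routes.map (fun route => movingRoute points route)) j) : Int))).sum := by
  show loopA (routes.foldl (fun acc route => acc ++ [movingRoute points route]) []) 0 0 = _
  rw [PySem.List.foldl_append_singleton_eq_map, List.nil_append]
  rw [loopA_sum _ H (maxLenA (routes.map (fun route => movingRoute points route))) 0 0 (by omega)]
  simp

-- == B-side: the flat counter counts duplicated (time, key) pairs ==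

def allPairs (mrs : List (List (List Int))) : List (Int × Int) :=
  mrs.flatMap (fun mr => (PySem.List.enumerate mr 0).map (fun p => (p.1, nowKey p.2)))

theorem nested_fold (mrs : List (List (List Int))) (d0 : PySem.Dict (Int × Int) Int) :
    mrs.foldl (fun d mr => (PySem.List.enumerate mr 0).foldl
        (fun d p => d.insert (p.1, nowKey p.2) (d.getD (p.1, nowKey p.2) 0 + 1)) d) d0
      = (allPairs mrs).foldl (fun d x => d.insert x (d.getD x 0 + 1)) d0 := by
  induction mrs generalizing d0 with
  | nil => rfl
  | cons mr mrs ih =>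
    rw [List.foldl_cons, allPairs, List.flatMap_cons, List.foldl_append, ← allPairs, ih,
      List.foldl_map]

theorem solution_alt_eq (points : List (List Int)) (routes : List (List Int))
    (hpre : Pre_solution points routes) :
    solution_alt points routes =
      ((PySem.Set.ofList (allPairs (routes.map (fun route => movingRoute points route)))).countP
        (fun k => decide (2 ≤ (allPairs (routes.map (fun route => movingRoute points route))).count k)) : Int) := by
  have hdef : solution_alt points routes =
      (routes.foldl (fun d route =>
        (PySem.List.enumerate (pathB points route) 0).foldl
          (fun d p => d.insert (p.1, nowKey p.2) (d.getD (p.1, nowKey p.2) 0 + 1)) d)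
      (PySem.Dict.empty : PySem.Dict (Int × Int) Int)).values.foldl
        (fun a v => if 2 ≤ v then a + 1 else a) 0 := rfl
  have hmap : routes.map (fun route => pathB points route)
      = routes.map (fun route => movingRoute points route) := by
    apply List.map_congr_left
    intro route hr
    exact (movingRoute_eq_pathB points route (hpre route hr).2).symm
  have hfold : routes.foldl (fun d route =>
        (PySem.List.enumerate (pathB points route) 0).foldl
          (fun d p => d.insert (p.1, nowKey p.2) (d.getD (p.1, nowKey p.2) 0 + 1)) d)
      (PySem.Dict.empty : PySem.Dict (Int × Int) Int)
      = (routes.map (fun route => movingRoute points route)).foldl (fun d mr =>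
        (PySem.List.enumerate mr 0).foldl
          (fun d p => d.insert (p.1, nowKey p.2) (d.getD (p.1, nowKey p.2) 0 + 1)) d)
      (PySem.Dict.empty : PySem.Dict (Int × Int) Int) := by
    rw [← hmap, List.foldl_map]
  rw [hdef, hfold]
  have hcnt : (routes.map (fun route => movingRoute points route)).foldl (fun d mr =>
      (PySem.List.enumerate mr 0).foldl
        (fun d p => d.insert (p.1, nowKey p.2) (d.getD (p.1, nowKey p.2) 0 + 1)) d)
      PySem.Dict.empty
      = PySem.Dict.counter (allPairs (routes.map (fun route => movingRoute points route))) := by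
    rw [nested_fold, PySem.Dict.foldl_insert_getD_add_one_eq_counter]
  rw [hcnt]
  have hvals : (PySem.Dict.counter (allPairs (routes.map (fun route => movingRoute points route)))).values
      = (PySem.Set.ofList (allPairs (routes.map (fun route => movingRoute points route)))).map
          (fun k => ((allPairs (routes.map (fun route => movingRoute points route))).count k : Int)) := by
    show (PySem.Dict.counter _).items.map (·.2) = _
    rw [PySem.Dict.items_counter, List.map_map]
    rfl
  rw [hvals, PySem.List.foldl_ite_add_one (p := fun v : Int => 2 ≤ v), List.countP_map]
  rw [zero_add, Nat.cast_inj]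
  apply List.countP_congr
  intro k _
  simp only [Function.comp_apply, decide_eq_true_eq]
  constructor <;> intro h <;> exact_mod_cast h

theorem mem_Kt (mrs : List (List (List Int))) (j : Nat) (v : Int) :
    v ∈ Kt mrs j ↔ ∃ mr ∈ mrs, j < mr.length ∧ nowKey (mr.getD j []) = v := by
  simp only [Kt, List.mem_map, List.mem_filter, decide_eq_true_eq]
  constructor
  · rintro ⟨mr, ⟨hmr, hlen⟩, rfl⟩
    exact ⟨mr, hmr, hlen, rfl⟩
  · rintro ⟨mr, hmr, hlen, rfl⟩
    exact ⟨mr, ⟨hmr, hlen⟩, rfl⟩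

theorem Kt_lt_maxLen (mrs : List (List (List Int))) (j : Nat) (v : Int)
    (h : v ∈ Kt mrs j) : j < maxLenA mrs := by
  obtain ⟨mr, hmr, hlen, _⟩ := (mem_Kt mrs j v).mp h
  have := (PySem.List.le_foldl_max_nat mrs (fun mr => mr.length) 0).2 mr hmr
  simp only [maxLenA]
  omega

theorem part_count (mr : List (List Int)) (j : Nat) (v : Int) :
    ((PySem.List.enumerate mr 0).map (fun p => (p.1, nowKey p.2))).count ((j : Int), v)
      = if j < mr.length ∧ nowKey (mr.getD j []) = v then 1 else 0 := by
  have hfst : ((PySem.List.enumerate mr 0).map (fun p => (p.1, nowKey p.2))).map Prod.fst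
      = PySem.List.pyRange 0 (mr.length : Int) 1 := by
    rw [List.map_map]
    have : (Prod.fst ∘ fun p : Int × List Int => (p.1, nowKey p.2)) = fun p => p.1 := rfl
    rw [this, PySem.List.map_fst_enumerate, zero_add]
  have hnodup : ((PySem.List.enumerate mr 0).map (fun p => (p.1, nowKey p.2))).Nodup := by
    apply List.Nodup.of_map Prod.fst
    rw [hfst, PySem.List.pyRange_zero_natCast]
    exact List.nodup_range.map (fun a b => by omega)
  have hmem : ((j : Int), v) ∈ (PySem.List.enumerate mr 0).map (fun p => (p.1, nowKey p.2)) ↔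
      j < mr.length ∧ nowKey (mr.getD j []) = v := by
    simp only [List.mem_map, PySem.List.mem_enumerate_iff]
    constructor
    · rintro ⟨p, ⟨k, hk, rfl⟩, hp⟩
      have hkj : (k : Int) = (j : Int) := by
        have := congrArg Prod.fst hp
        simpa using this
      have : k = j := by exact_mod_cast hkj
      subst this
      have hv : nowKey mr[k] = v := by
        have := congrArg Prod.snd hp
        simpa using this
      exact ⟨hk, by rw [List.getD_eq_getElem _ _ hk]; exact hv⟩
    · rintro ⟨hlen, hv⟩
      exact ⟨((j : Int), mr[j]), ⟨j, hlen, by simp⟩,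
        by rw [List.getD_eq_getElem _ _ hlen] at hv; simp [hv]⟩
  by_cases h : j < mr.length ∧ nowKey (mr.getD j []) = v
  · rw [if_pos h]
    exact List.count_eq_one_of_mem hnodup (hmem.mpr h)
  · rw [if_neg h]
    exact List.count_eq_zero_of_not_mem (fun hm => h (hmem.mp hm))

theorem count_allPairs (mrs : List (List (List Int))) (j : Nat) (v : Int) :
    (allPairs mrs).count ((j : Int), v) = (Kt mrs j).count v := by
  induction mrs with
  | nil => rfl
  | cons mr mrs ih =>
    rw [allPairs, List.flatMap_cons, List.count_append, ← allPairs, ih, part_count, Kt_cons]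
    set w := nowKey (mr.getD j []) with hw
    by_cases h : j < mr.length
    · by_cases hv : w = v
      · rw [if_pos ⟨h, hv⟩, if_pos h, List.count_cons]
        simp only [hv, beq_self_eq_true, if_true]
        omega
      · rw [if_neg (by tauto), if_pos h, List.count_cons]
        have hb : (w == v) = false := by simp [hv]
        rw [hb]
        simp
    · rw [if_neg (by tauto), if_neg h]
      simp

theorem mem_allPairs (mrs : List (List (List Int))) (t v : Int) :
    (t, v) ∈ allPairs mrs ↔ ∃ j : Nat, t = (j : Int) ∧ v ∈ Kt mrs j := by
  simp only [allPairs, List.mem_flatMap, List.mem_map, PySem.List.mem_enumerate_iff]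
  constructor
  · rintro ⟨mr, hmr, p, ⟨k, hk, rfl⟩, hp⟩
    refine ⟨k, ?_, ?_⟩
    · have := congrArg Prod.fst hp; simpa using this.symm
    · have hv : nowKey mr[k] = v := by have := congrArg Prod.snd hp; simpa using this
      exact (mem_Kt mrs k v).mpr ⟨mr, hmr, hk, by rw [List.getD_eq_getElem _ _ hk]; exact hv⟩
  · rintro ⟨j, rfl, hv⟩
    obtain ⟨mr, hmr, hlen, hkey⟩ := (mem_Kt mrs j v).mp hv
    exact ⟨mr, hmr, ((j : Int), mr[j]), ⟨j, hlen, by simp⟩,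
      by rw [List.getD_eq_getElem _ _ hlen] at hkey; simp [hkey]⟩

theorem group_countP (mrs : List (List (List Int))) :
    (PySem.Set.ofList (allPairs mrs)).countP
        (fun k => decide (2 ≤ (allPairs mrs).count k))
      = ((List.range (maxLenA mrs)).map (fun j => dupCnt (Kt mrs j))).sum := by
  set M := maxLenA mrs with hM
  set L : List (Int × Int) :=
    (List.range M).flatMap (fun j => (PySem.Set.ofList (Kt mrs j)).map (fun v => ((j : Int), v)))
    with hL
  have hLnodup : L.Nodup := by
    rw [hL, List.flatMap_def, List.nodup_flatten]
    constructor
    · intro l hl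
      simp only [List.mem_map] at hl
      obtain ⟨j, _, rfl⟩ := hl
      exact (PySem.Set.nodup_ofList _).map (fun a b h => by simpa using h)
    · rw [List.pairwise_map]
      apply List.pairwise_lt_range.imp
      intro a b hab
      intro x hxa hxb
      simp only [List.mem_map] at hxa hxb
      obtain ⟨va, _, rfl⟩ := hxa
      obtain ⟨vb, _, heq⟩ := hxb
      have : (b : Int) = (a : Int) := congrArg Prod.fst heq
      omega
  have hmemL : ∀ a : Int × Int, a ∈ L ↔ a ∈ PySem.Set.ofList (allPairs mrs) := by
    rintro ⟨t, v⟩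
    rw [PySem.Set.mem_ofList, mem_allPairs, hL, List.mem_flatMap]
    constructor
    · rintro ⟨j, hj, hmem⟩
      simp only [List.mem_map] at hmem
      obtain ⟨w, hw, heq⟩ := hmem
      obtain ⟨rfl, rfl⟩ := Prod.mk.injEq .. ▸ And.intro (congrArg Prod.fst heq).symm (congrArg Prod.snd heq).symm
      exact ⟨j, rfl, (PySem.Set.mem_ofList _ _).mp hw⟩
    · rintro ⟨j, rfl, hv⟩
      refine ⟨j, ?_, ?_⟩
      · rw [List.mem_range]
        exact Kt_lt_maxLen mrs j v hv
      · simp only [List.mem_map]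
        exact ⟨v, (PySem.Set.mem_ofList _ _).mpr hv, rfl⟩
  have hperm : L.Perm (PySem.Set.ofList (allPairs mrs)) :=
    (List.perm_ext_iff_of_nodup hLnodup (PySem.Set.nodup_ofList _)).mpr hmemL
  rw [← hperm.countP_eq]
  rw [hL, List.flatMap_def, List.countP_flatten, List.map_map]
  apply congrArg
  apply List.map_congr_left
  intro j _
  simp only [Function.comp_apply, List.countP_map]
  apply List.countP_congr
  intro v _
  simp only [Function.comp_apply, decide_eq_true_eq, dupCnt]
  rw [count_allPairs]

-- ===== VERDICT =====

theorem solution_spec : Claim_equal_solution := by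
  intro points routes _hdom hpre
  unfold Spec_solution
  have H : ∀ mr ∈ routes.map (fun route => movingRoute points route),
      ∀ cell ∈ mr, 0 ≤ nowKey cell := by
    intro mr hmr cell hcell
    simp only [List.mem_map] at hmr
    obtain ⟨route, hr, rfl⟩ := hmr
    exact nowKey_nonneg cell
      (movingRoute_cells points route (fun r hrr => (hpre route hr).2 r hrr) cell hcell)
  rw [solutionA_sum points routes H, solution_alt_eq points routes hpre, group_countP,
    ← List.range_eq_range', Nat.cast_list_sum, List.map_map]
  rfl
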